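-- pv_equiv track=rewrite | github.com/magosil86/beautiful_strings | beautiful.py | assign_values
-- ===== SOURCE A (Python) =====
-- def clean_string(input):
-- 	input = input.lower()
-- 	letters = [char for char in input if char.isalpha()]
-- 	cleaned = "".join(letters)
-- 	return cleaned
--
-- def count_chars(input):
-- 	input = clean_string(input)
-- 	counts = {}
-- 	for char in input:
-- 		if char in counts:
-- 			counts[char] += 1
-- 		else:
-- 			counts[char] = 1
-- 	return counts
--
-- def assign_values(input):
-- 	counts = count_chars(input)
-- 	sorted_chars = sorted(counts, key=counts.get, reverse=True)
-- 	values = {}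
-- 	beauty = 26
-- 	for char in sorted_chars:
-- 		values[char] = beauty
-- 		beauty = beauty - 1
-- 	return values
-- ===== SOURCE B (Python) =====
-- def assign_values(input):
--     freq = {}
--     for ch in input.lower():
--         if ch.isalpha():
--             freq[ch] = freq.get(ch, 0) + 1
--     buckets = {}
--     for ch, c in freq.items():
--         buckets.setdefault(c, []).append(ch)
--     values = {}
--     beauty = 26
--     for c in range(max(buckets, default=0), 0, -1):
--         for ch in buckets.get(c, []):
--             values[ch] = beauty
--             beauty -= 1
--     return values
-- ===== Notes on version B (the rewrite author's own statement) =====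
-- stated objective: alternative
-- what changed: B counts letters in one inline pass (no intermediate cleaned string), groups letters into buckets keyed by frequency, and emits them by walking counts from the maximum down to 1 instead of calling a comparison sort on the letters.
import Mathlib
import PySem

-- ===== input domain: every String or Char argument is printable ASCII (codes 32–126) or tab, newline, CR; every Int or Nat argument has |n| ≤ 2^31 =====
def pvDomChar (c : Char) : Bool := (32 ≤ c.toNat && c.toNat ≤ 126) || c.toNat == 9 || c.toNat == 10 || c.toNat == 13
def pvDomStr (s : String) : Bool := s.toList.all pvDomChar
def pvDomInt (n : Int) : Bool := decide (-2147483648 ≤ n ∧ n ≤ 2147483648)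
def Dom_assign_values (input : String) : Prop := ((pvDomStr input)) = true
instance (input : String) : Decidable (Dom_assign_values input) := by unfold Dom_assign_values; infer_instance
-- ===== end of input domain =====

-- B replaces A's sort of the letters by a frequency-bucket walk from the maximal count down (objective: alternative).

-- ===== PORT A =====
def clean_string (input : String) : String :=
  let input := PySem.Str.lower input
  let letters := input.toList.filter (fun char => PySem.Chars.isalpha char)
  String.ofList letters

def count_chars (input : String) : PySem.Dict Char Int :=
  let input := clean_string input
  input.toList.foldl
    (fun counts char =>
      if counts.contains char then counts.insert char (counts.getD char 0 + 1)
      else counts.insert char 1)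
    PySem.Dict.empty

def assign_values (input : String) : List (String × Int) :=
  let counts := count_chars input
  let sorted_chars := PySem.List.sorted counts.keys (fun c => counts.getD c 0) true
  let st := sorted_chars.foldl
    (fun (st : PySem.Dict String Int × Int) char =>
      (st.1.insert (String.ofList [char]) st.2, st.2 - 1))
    (PySem.Dict.empty, 26)
  st.1.items

-- ===== PORT B =====
def assign_values_alt (input : String) : List (String × Int) :=
  let freq := (PySem.Str.lower input).toList.foldl
    (fun freq ch =>
      if PySem.Chars.isalpha ch then freq.insert ch (freq.getD ch 0 + 1) else freq)
    PySem.Dict.empty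
  let buckets := freq.items.foldl
    (fun (b : PySem.Dict Int (List Char)) p => b.modify p.2 [] (· ++ [p.1]))
    PySem.Dict.empty
  let st := (PySem.List.pyRange (PySem.List.maxD buckets.keys (fun v => v) 0) 0 (-1)).foldl
    (fun (st : PySem.Dict String Int × Int) c =>
      (buckets.getD c []).foldl
        (fun (st : PySem.Dict String Int × Int) ch =>
          (st.1.insert (String.ofList [ch]) st.2, st.2 - 1))
        st)
    (PySem.Dict.empty, 26)
  st.1.items

-- ===== PRECONDITION & SPEC =====
def Spec_assign_values (input : String) (out : List (String × Int)) : Prop := out = assign_values_alt input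
instance (input : String) (out : List (String × Int)) : Decidable (Spec_assign_values input out) := by unfold Spec_assign_values; infer_instance

-- ===== CLAIM (what is proved, stated in full; the proofs are below) =====
def Claim_equal_assign_values : Prop := ∀ (input : String), Dom_assign_values input → Spec_assign_values input (assign_values input)

-- ===== LEMMAS AND PROOFS =====

-- insertBy passes unchanged over a prefix none of whose elements x goes before
theorem insertBy_append_left {α : Type} (before : α → α → Bool) (x : α) (p rest : List α)
    (h : ∀ y ∈ p, before x y = false) :
    PySem.List.insertBy before x (p ++ rest) = p ++ PySem.List.insertBy before x rest := by
  induction p with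
  | nil => simp
  | cons a t ih =>
    simp only [List.cons_append, PySem.List.insertBy, h a (by simp)]
    simp only [Bool.false_eq_true, if_false, List.cons.injEq, true_and]
    exact ih (fun y hy => h y (by simp [hy]))

-- insertBy puts x in front when it goes before every element
theorem insertBy_eq_cons {α : Type} (before : α → α → Bool) (x : α) (l : List α)
    (h : ∀ y ∈ l, before x y = true) :
    PySem.List.insertBy before x l = x :: l := by
  cases l with
  | nil => rfl
  | cons a t => simp [PySem.List.insertBy, h a (by simp)]

-- inserting x into the bucket concatenation appends it to its own bucket
theorem insertBy_flatMap_buckets {α : Type} (key : α → Int) (x : α) (xs : List α)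
    (vs : List Int) (hp : vs.Pairwise (· > ·)) (hx : key x ∈ vs) :
    PySem.List.insertBy (fun a b => decide (key b < key a)) x
        (vs.flatMap (fun v => xs.filter (fun y => key y == v)))
      = vs.flatMap (fun v => xs.filter (fun y => key y == v)
          ++ if key x == v then [x] else []) := by
  induction vs with
  | nil => simp at hx
  | cons v vs' ih =>
    have hhead : ∀ w ∈ vs', v > w := (List.pairwise_cons.mp hp).1
    have hp' : vs'.Pairwise (· > ·) := (List.pairwise_cons.mp hp).2
    have hxv : key x = v ∨ key x ∈ vs' := by simpa using hx
    have hkle : key x ≤ v := by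
      rcases hxv with h | h
      · omega
      · exact le_of_lt (hhead _ h)
    -- x does not go before any element of the head bucket
    have hpass : ∀ y ∈ xs.filter (fun y => key y == v),
        (fun a b => decide (key b < key a)) x y = false := by
      intro y hy
      have : key y = v := by simpa using (List.mem_filter.mp hy).2
      simp [this]; omega
    simp only [List.flatMap_cons]
    rw [insertBy_append_left _ _ _ _ hpass]
    rcases hxv with h | h
    · -- x belongs to the head bucket: it goes before everything in the tail buckets
      have hall : ∀ y ∈ vs'.flatMap (fun v => xs.filter (fun y => key y == v)),
          (fun a b => decide (key b < key a)) x y = true := by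
        intro y hy
        simp only [List.mem_flatMap, List.mem_filter] at hy
        obtain ⟨w, hw, _, hkey⟩ := hy
        have : key y = w := by simpa using hkey
        have : key y < v := this ▸ hhead _ hw
        simp [h, this]
      rw [insertBy_eq_cons _ _ _ hall]
      have hne : ∀ w ∈ vs', ¬ (key x == w) = true := by
        intro w hw hc
        have : key x = w := by simpa using hc
        have := hhead _ hw; omega
      have hrest : (vs'.flatMap (fun v => xs.filter (fun y => key y == v)
            ++ if key x == v then [x] else []))
          = vs'.flatMap (fun v => xs.filter (fun y => key y == v)) := by
        apply List.flatMap_congr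
        intro w hw
        simp [hne w hw]
      rw [hrest]
      simp [h]
    · -- x belongs to a later bucket
      have hne : ¬ (key x == v) = true := by
        have := hhead _ h
        simp; omega
      rw [ih hp' h]
      simp [hne]

-- stable reverse sort by an Int key = concatenation of the key buckets in descending order
theorem sorted_rev_eq_flatMap_buckets {α : Type} (xs : List α) (key : α → Int)
    (vs : List Int) (hp : vs.Pairwise (· > ·)) (hmem : ∀ x ∈ xs, key x ∈ vs) :
    PySem.List.sorted xs key true
      = vs.flatMap (fun v => xs.filter (fun y => key y == v)) := by
  induction xs using List.reverseRecOn with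
  | nil => simp [PySem.List.sorted]
  | append_singleton t x ih =>
    have ht : ∀ y ∈ t, key y ∈ vs := fun y hy => hmem y (by simp [hy])
    have hx : key x ∈ vs := hmem x (by simp)
    rw [PySem.List.sorted_rev_eq_foldl_insertBy, List.foldl_append]
    simp only [List.foldl_cons, List.foldl_nil]
    rw [← PySem.List.sorted_rev_eq_foldl_insertBy, ih ht,
        insertBy_flatMap_buckets key x t vs hp hx]
    apply List.flatMap_congr
    intro v hv
    rw [List.filter_append]
    by_cases h : key x = v <;> simp [h]

-- pyRange m 0 (-1) for 0 ≤ m, explicitly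
theorem pyRange_down (m : Int) (hm : 0 ≤ m) :
    PySem.List.pyRange m 0 (-1) = (List.range m.toNat).map (fun j : Nat => m - (j : Int)) := by
  simp only [PySem.List.pyRange]
  rw [if_neg (show ¬((-1 : Int) = 0) by norm_num)]
  rw [if_neg (show ¬((0 : Int) < -1) by norm_num)]
  rcases lt_or_ge 0 m with h | h
  · rw [if_pos h]
    have hc : ((m - 0 + - -(1 : Int) - 1) / - -(1 : Int)).toNat = m.toNat := by norm_num
    rw [hc]
    apply List.map_congr_left
    intro j hj
    ring
  · rw [if_neg (by omega)]
    have h0 : m.toNat = 0 := by omega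
    simp [h0]

theorem pyRange_down_pairwise (m : Int) (hm : 0 ≤ m) :
    (PySem.List.pyRange m 0 (-1)).Pairwise (· > ·) := by
  rw [pyRange_down m hm]
  refine List.pairwise_map.mpr ?_
  exact List.pairwise_lt_range.imp (fun {a b} h => by omega)

theorem mem_pyRange_down (m v : Int) (hm : 0 ≤ m) :
    v ∈ PySem.List.pyRange m 0 (-1) ↔ 1 ≤ v ∧ v ≤ m := by
  rw [pyRange_down m hm]
  constructor
  · intro h
    obtain ⟨j, hj, hv⟩ := List.mem_map.mp h
    have hj' := List.mem_range.mp hj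
    omega
  · intro h
    exact List.mem_map.mpr ⟨(m - v).toNat, List.mem_range.mpr (by omega), by omega⟩

-- A's branching count loop is Counter(cleaned letters)
theorem count_chars_eq (input : String) :
    count_chars input
      = PySem.Dict.counter ((PySem.Str.lower input).toList.filter (fun c => PySem.Chars.isalpha c)) := by
  unfold count_chars clean_string
  simp only [String.toList_ofList]
  rw [PySem.List.foldl_congr_mem _ _ (fun d (x : Char) => d.insert x (d.getD x 0 + 1)) _ ?_]
  · exact PySem.Dict.foldl_insert_getD_add_one_eq_counter _
  · intro acc x _
    by_cases hc : acc.contains x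
    · simp [hc]
    · have hc' : acc.contains x = false := by simpa using hc
      simp only [hc', Bool.false_eq_true, if_false,
        PySem.Dict.getD_of_not_contains acc 0 hc']
      norm_num

-- B's guarded count loop is the same Counter
theorem freq_eq (input : String) :
    (PySem.Str.lower input).toList.foldl
        (fun freq ch =>
          if PySem.Chars.isalpha ch then freq.insert ch (freq.getD ch 0 + 1) else freq)
        PySem.Dict.empty
      = PySem.Dict.counter ((PySem.Str.lower input).toList.filter (fun c => PySem.Chars.isalpha c)) := by
  rw [PySem.List.foldl_if_eq_foldl_filter]
  exact PySem.Dict.foldl_insert_getD_add_one_eq_counter _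

-- the frequency bucket of v is the letters whose count is v, in first-appearance order
theorem buckets_getD (cs : List Char) (v : Int) :
    ((PySem.Dict.counter cs).items.foldl
        (fun (b : PySem.Dict Int (List Char)) p => b.modify p.2 [] (· ++ [p.1]))
        PySem.Dict.empty).getD v []
      = (PySem.Set.ofList cs).filter (fun c => ((cs.count c : Int)) == v) := by
  have h1 : (PySem.Dict.counter cs).items.foldl
        (fun (b : PySem.Dict Int (List Char)) p => b.modify p.2 [] (· ++ [p.1]))
        PySem.Dict.empty
      = ((PySem.Dict.counter cs).items.map (fun p => (p.2, p.1))).foldl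
        (fun (b : PySem.Dict Int (List Char)) p => b.modify p.1 [] (· ++ [p.2]))
        PySem.Dict.empty := by
    rw [List.foldl_map]
  rw [h1, PySem.Dict.getD_foldl_modify_append, PySem.Dict.getD_empty]
  rw [PySem.Dict.items_counter, List.map_map, List.filter_map, List.map_map]
  simp [Function.comp_def]

-- the bucket keys are the distinct counts
theorem buckets_keys (cs : List Char) :
    ((PySem.Dict.counter cs).items.foldl
        (fun (b : PySem.Dict Int (List Char)) p => b.modify p.2 [] (· ++ [p.1]))
        PySem.Dict.empty).keys
      = PySem.Set.ofList ((PySem.Set.ofList cs).map (fun c => (cs.count c : Int))) := by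
  have h := PySem.Dict.keys_foldl_modify_key (ν := List Char)
      (PySem.Dict.counter cs).items (fun p => p.2) ([] : List Char)
      (fun _ p l => l ++ [p.1]) PySem.Dict.empty
  simpa [PySem.Dict.items_counter, List.map_map, Function.comp, PySem.Dict.keys_empty] using h

-- the main chain on the cleaned letter list
theorem assign_core (cs : List Char) :
    ((PySem.List.sorted (PySem.Dict.counter cs).keys
          (fun c => (PySem.Dict.counter cs).getD c 0) true).foldl
        (fun (st : PySem.Dict String Int × Int) char =>
          (st.1.insert (String.ofList [char]) st.2, st.2 - 1))
        (PySem.Dict.empty, 26)).1.items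
    = ((PySem.List.pyRange
          (PySem.List.maxD
            ((PySem.Dict.counter cs).items.foldl
              (fun (b : PySem.Dict Int (List Char)) p => b.modify p.2 [] (· ++ [p.1]))
              PySem.Dict.empty).keys (fun v => v) 0) 0 (-1)).foldl
        (fun (st : PySem.Dict String Int × Int) c =>
          (((PySem.Dict.counter cs).items.foldl
              (fun (b : PySem.Dict Int (List Char)) p => b.modify p.2 [] (· ++ [p.1]))
              PySem.Dict.empty).getD c []).foldl
            (fun (st : PySem.Dict String Int × Int) ch =>
              (st.1.insert (String.ofList [ch]) st.2, st.2 - 1)) st)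
        (PySem.Dict.empty, 26)).1.items := by
  rw [buckets_keys]
  set m0 : Int := PySem.List.maxD
      (PySem.Set.ofList ((PySem.Set.ofList cs).map (fun c => (cs.count c : Int))))
      (fun v => v) 0 with hm0
  have hlbound : ∀ c ∈ PySem.Set.ofList cs, (1 : Int) ≤ (cs.count c : Int) := by
    intro c hc
    rw [PySem.Set.mem_ofList] at hc
    have := List.count_pos_iff.mpr hc
    omega
  have hubound : ∀ c ∈ PySem.Set.ofList cs, ((cs.count c : Int)) ≤ m0 := by
    intro c hc
    have hmem : ((cs.count c : Int))
        ∈ PySem.Set.ofList ((PySem.Set.ofList cs).map (fun c => (cs.count c : Int))) := by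
      rw [PySem.Set.mem_ofList]
      exact List.mem_map_of_mem hc
    cases hmax : PySem.List.max?
        (PySem.Set.ofList ((PySem.Set.ofList cs).map (fun c => (cs.count c : Int))))
        (fun v => v) with
    | none =>
      rw [PySem.List.max?_eq_none_iff] at hmax
      rw [hmax] at hmem
      simp at hmem
    | some mm =>
      have := PySem.List.max?_isMax hmax _ hmem
      simpa [hm0, PySem.List.maxD, hmax] using this
  have hm : 0 ≤ m0 := by
    cases hmax : PySem.List.max?
        (PySem.Set.ofList ((PySem.Set.ofList cs).map (fun c => (cs.count c : Int))))
        (fun v => v) with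
    | none => simp [hm0, PySem.List.maxD, hmax]
    | some mm =>
      have hmem := PySem.List.max?_mem hmax
      rw [PySem.Set.mem_ofList] at hmem
      obtain ⟨c, hc, rfl⟩ := List.mem_map.mp hmem
      have := hlbound c hc
      have hval : m0 = (cs.count c : Int) := by simp [hm0, PySem.List.maxD, hmax]
      omega
  have hsorted : PySem.List.sorted (PySem.Set.ofList cs) (fun c => (cs.count c : Int)) true
      = (PySem.List.pyRange m0 0 (-1)).flatMap
          (fun v => (PySem.Set.ofList cs).filter (fun y => (cs.count y : Int) == v)) :=
    sorted_rev_eq_flatMap_buckets _ _ _ (pyRange_down_pairwise m0 hm)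
      (fun x hx => (mem_pyRange_down m0 _ hm).mpr ⟨hlbound x hx, hubound x hx⟩)
  have hkey : (fun c => (PySem.Dict.counter cs).getD c 0)
      = (fun c => (cs.count c : Int)) := funext (fun c => PySem.Dict.getD_counter cs c)
  rw [PySem.Dict.keys_counter, hkey, hsorted]
  rw [PySem.List.foldl_congr_mem _
      (fun (st : PySem.Dict String Int × Int) c =>
        (((PySem.Dict.counter cs).items.foldl
            (fun (b : PySem.Dict Int (List Char)) p => b.modify p.2 [] (· ++ [p.1]))
            PySem.Dict.empty).getD c []).foldl
          (fun (st : PySem.Dict String Int × Int) ch =>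
            (st.1.insert (String.ofList [ch]) st.2, st.2 - 1)) st)
      (fun (st : PySem.Dict String Int × Int) c =>
        ((PySem.Set.ofList cs).filter (fun y => (cs.count y : Int) == c)).foldl
          (fun (st : PySem.Dict String Int × Int) ch =>
            (st.1.insert (String.ofList [ch]) st.2, st.2 - 1)) st)
      _ ?_]
  · rw [← List.foldl_flatMap]
  · intro acc c _
    simp only [buckets_getD]

-- ===== VERDICT (by name: the statement is the Claim_ definition above) =====
theorem assign_values_spec : Claim_equal_assign_values := by
  intro input _
  unfold Spec_assign_values
  simp only [assign_values, assign_values_alt, count_chars_eq, freq_eq]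
  exact assign_core _
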